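-- pv_equiv track=rewrite | github.com/ArslanArdavic/sounds-good | backend/src/services/track_validator.py | validate_track_ids
-- ===== SOURCE A (Python) =====
-- def validate_track_ids(
--     chosen: list[str],
--     allowed_ids: set[str],
-- ) -> tuple[list[str], list[str]]:
--     """Return (valid_ordered, invalid_ids).
--
--     Preserves order of *chosen* for valid IDs; drops duplicates after first
--     occurrence. Invalid IDs are any string not in *allowed_ids*.
--     """
--     seen: set[str] = set()
--     valid: list[str] = []
--     invalid: list[str] = []
--     for sid in chosen:
--         if sid not in allowed_ids:
--             invalid.append(sid)
--             continue
--         if sid in seen: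
--             continue
--         seen.add(sid)
--         valid.append(sid)
--     return valid, invalid
-- ===== SOURCE B (Python) =====
-- def validate_track_ids(chosen, allowed_ids):
--     valid = []
--     invalid = []
--     for sid in reversed(chosen):
--         if sid in allowed_ids:
--             valid = [v for v in valid if v != sid]
--             valid.append(sid)
--         else:
--             invalid.append(sid)
--     return valid[::-1], invalid[::-1]
-- ===== Notes on version B (the rewrite author's own statement) =====
-- stated objective: alternative
-- what changed: Traverses chosen back-to-front with no seen-set at all: duplicates are removed by deleting the id from the accumulated valid list before re-appending it, and both accumulators are reversed once at the end.
import Mathlib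
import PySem

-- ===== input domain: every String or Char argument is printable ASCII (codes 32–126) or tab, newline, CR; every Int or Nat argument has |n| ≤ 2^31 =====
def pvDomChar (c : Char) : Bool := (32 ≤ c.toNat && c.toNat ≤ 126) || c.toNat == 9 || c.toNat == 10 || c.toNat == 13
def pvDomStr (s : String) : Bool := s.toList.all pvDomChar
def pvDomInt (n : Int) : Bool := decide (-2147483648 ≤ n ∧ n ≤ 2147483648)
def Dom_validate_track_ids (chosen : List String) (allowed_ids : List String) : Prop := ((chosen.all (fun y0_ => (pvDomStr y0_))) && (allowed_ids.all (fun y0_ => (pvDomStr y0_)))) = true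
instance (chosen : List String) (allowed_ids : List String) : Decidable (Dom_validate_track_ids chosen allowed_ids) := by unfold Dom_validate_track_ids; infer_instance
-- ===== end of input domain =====

-- B re-derives the same result by a back-to-front traversal with removal-based dedup
-- (no seen-set), an alternative decomposition of the same cost class (objective: alternative).

-- ===== PORT A =====
-- one loop over chosen, state (seen, valid, invalid)
def validate_track_ids (chosen : List String) (allowed_ids : List String) : List String × List String :=
  let r := chosen.foldl
    (fun (st : PySem.Set String × List String × List String) sid =>
      let seen := st.1
      let valid := st.2.1
      let invalid := st.2.2
      if ¬ PySem.Set.contains allowed_ids sid then (seen, valid, invalid ++ [sid])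
      else if PySem.Set.contains seen sid then (seen, valid, invalid)
      else (PySem.Set.add seen sid, valid ++ [sid], invalid))
    (PySem.Set.empty, [], [])
  (r.2.1, r.2.2)

-- ===== PORT B =====
-- loop over reversed(chosen); valid dedup by removing sid then appending; reverse both at the end
def validate_track_ids_alt (chosen : List String) (allowed_ids : List String) : List String × List String :=
  let r := chosen.reverse.foldl
    (fun (st : List String × List String) sid =>
      if PySem.Set.contains allowed_ids sid then
        ((st.1.filter (fun v => v ≠ sid)) ++ [sid], st.2)
      else (st.1, st.2 ++ [sid]))
    ([], [])
  (r.1.reverse, r.2.reverse)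

-- ===== PRECONDITION & SPEC =====
def Spec_validate_track_ids (chosen : List String) (allowed_ids : List String) (out : List String × List String) : Prop := out = validate_track_ids_alt chosen allowed_ids
instance (chosen : List String) (allowed_ids : List String) (out : List String × List String) : Decidable (Spec_validate_track_ids chosen allowed_ids out) := by unfold Spec_validate_track_ids; infer_instance

-- ===== CLAIM (what is proved, stated in full; the proofs are below) =====
def Claim_equal_validate_track_ids : Prop := ∀ (chosen : List String) (allowed_ids : List String), Dom_validate_track_ids chosen allowed_ids → Spec_validate_track_ids chosen allowed_ids (validate_track_ids chosen allowed_ids)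

-- ===== LEMMAS AND PROOFS =====

-- keep-first dedup, as structural recursion
def dfirst : List String → List String
  | [] => []
  | x :: r => x :: (dfirst r).filter (fun v => v ≠ x)

-- first-occurrence dedup of xs relative to an already-seen prefix (shape of A's loop)
def ddA (seen : List String) : List String → List String
  | [] => []
  | x :: r => if seen.contains x then ddA seen r else x :: ddA (seen ++ [x]) r

theorem ddA_eq_filter_dfirst (xs : List String) (seen : List String) :
    ddA seen xs = (dfirst xs).filter (fun v => !seen.contains v) := by
  induction xs generalizing seen with
  | nil => simp [ddA, dfirst]
  | cons x r ih =>
    by_cases h : x ∈ seen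
    · have hx : seen.contains x = true := by simpa using h
      simp only [ddA, dfirst, hx, if_true, List.filter_cons, Bool.not_true,
        Bool.false_eq_true, if_false]
      rw [ih seen, List.filter_filter]
      apply List.filter_congr
      intro v _
      by_cases hv : v ∈ seen
      · simp [hv]
      · have : v ≠ x := fun he => hv (he ▸ h)
        simp [hv, this]
    · have hx : seen.contains x = false := by simpa using h
      simp only [ddA, dfirst, hx, Bool.false_eq_true, if_false, List.filter_cons,
        Bool.not_false, if_true]
      rw [ih (seen ++ [x]), List.filter_filter]
      congr 1
      apply List.filter_congr
      intro v _
      by_cases hv : v ∈ seen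
      · simp [hv]
      · by_cases hvx : v = x <;> simp [hv, hvx]

-- characterisation of A's loop
theorem loopA_eq (allowed_ids : List String) (xs : List String)
    (st : PySem.Set String × List String × List String) :
    xs.foldl
      (fun (st : PySem.Set String × List String × List String) sid =>
        let seen := st.1
        let valid := st.2.1
        let invalid := st.2.2
        if ¬ PySem.Set.contains allowed_ids sid then (seen, valid, invalid ++ [sid])
        else if PySem.Set.contains seen sid then (seen, valid, invalid)
        else (PySem.Set.add seen sid, valid ++ [sid], invalid))
      st
    = (List.foldl PySem.Set.add st.1 (xs.filter (fun sid => PySem.Set.contains allowed_ids sid)),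
       st.2.1 ++ ddA st.1 (xs.filter (fun sid => PySem.Set.contains allowed_ids sid)),
       st.2.2 ++ xs.filter (fun sid => ¬ PySem.Set.contains allowed_ids sid)) := by
  induction xs generalizing st with
  | nil => simp [ddA]
  | cons x r ih =>
    rw [List.foldl_cons, ih]
    by_cases hm : x ∈ allowed_ids
    · by_cases hs : x ∈ st.1
      · simp [PySem.Set.contains, PySem.Set.add, hm, hs, ddA]
      · simp [PySem.Set.contains, PySem.Set.add, hm, hs, ddA]
    · simp [PySem.Set.contains, hm]

-- characterisation of B's loop (a foldr over chosen after List.foldl_reverse)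
theorem loopB_eq (allowed_ids : List String) (xs : List String) :
    xs.foldr
      (fun sid (st : List String × List String) =>
        if PySem.Set.contains allowed_ids sid then
          ((st.1.filter (fun v => v ≠ sid)) ++ [sid], st.2)
        else (st.1, st.2 ++ [sid]))
      ([], [])
    = ((dfirst (xs.filter (fun sid => PySem.Set.contains allowed_ids sid))).reverse,
       (xs.filter (fun sid => ¬ PySem.Set.contains allowed_ids sid)).reverse) := by
  induction xs with
  | nil => simp [dfirst]
  | cons x r ih =>
    rw [List.foldr_cons, ih]
    by_cases hm : x ∈ allowed_ids
    · simp [PySem.Set.contains, hm, dfirst, List.filter_reverse]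
    · simp [PySem.Set.contains, hm]

-- ===== VERDICT (by name: the statement is the Claim_ definition above) =====
theorem validate_track_ids_spec : Claim_equal_validate_track_ids := by
  intro chosen allowed_ids _
  unfold Spec_validate_track_ids validate_track_ids validate_track_ids_alt
  rw [loopA_eq, List.foldl_reverse, loopB_eq]
  simp [ddA_eq_filter_dfirst, PySem.Set.empty]
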